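-- pv_equiv track=rewrite | github.com/ankul-in/Two-years | KATA125.py | possible_positions
-- ===== SOURCE A (Python) =====
-- def possible_positions(pos):
--     x=ord(pos[0])
--     y=int(pos[1])
--     moves=[(2, 1), (1, 2), (-1, 2), (-2, 1), (-2, -1), (-1, -2), (1, -2), (2, -1)]
--     result = []
--     for dx, dy in moves:
--         nx, ny = x + dx, y + dy
--         if ord('a') <= nx <= ord('h') and 1 <= ny <= 8:
--             result.append(chr(nx) + str(ny))
--
--     return sorted(result)
-- ===== SOURCE B (Python) =====
-- def possible_positions(pos):
--     x = ord(pos[0])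
--     y = int(pos[1])
--     out = []
--     for nx in range(max(97, x - 2), min(104, x + 2) + 1):
--         d = nx - x
--         if d == 0:
--             continue
--         step = 3 - abs(d)
--         for ny in (y - step, y + step):
--             if 1 <= ny <= 8:
--                 out.append(chr(nx) + str(ny))
--     return out
-- ===== Notes on version B (the rewrite author's own statement) =====
-- stated objective: alternative
-- what changed: B has no table of the 8 knight offsets and no sort: it derives the moves arithmetically, ranging over the reachable target columns nx in [x-2,x+2] clipped to the board (skipping nx=x) and, from the knight invariant |dx|+|dy|=3, taking the two ranks y-(3-|dx|) and y+(3-|dx|); this column-ascending, rank-ascending traversal emits the squares already in lexicographic order, so A's final sort disappears.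
import Mathlib
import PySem

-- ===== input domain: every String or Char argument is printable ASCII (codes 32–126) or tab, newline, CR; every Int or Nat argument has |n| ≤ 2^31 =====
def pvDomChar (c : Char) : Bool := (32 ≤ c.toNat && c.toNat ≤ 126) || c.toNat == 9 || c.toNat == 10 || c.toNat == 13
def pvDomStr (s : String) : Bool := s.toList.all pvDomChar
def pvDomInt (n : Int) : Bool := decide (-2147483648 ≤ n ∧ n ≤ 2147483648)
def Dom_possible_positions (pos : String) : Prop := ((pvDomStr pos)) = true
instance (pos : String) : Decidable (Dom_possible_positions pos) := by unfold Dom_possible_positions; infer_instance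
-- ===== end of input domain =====

-- B derives knight moves arithmetically (target columns x-2..x+2 clipped to the board, ranks
-- y±(3-|dx|)) in an order that is already lexicographic, so A's offset table and final sort
-- disappear; equality of return values is proved on inputs whose second character is a digit
-- (elsewhere Python's int() or the indexing raises).

-- ===== PORT A =====
-- moves list of A, literal
def movesA : List (Int × Int) := [(2, 1), (1, 2), (-1, 2), (-2, 1), (-2, -1), (-1, -2), (1, -2), (2, -1)]

-- A's loop + sorted(result), with x = ord(pos[0]) and y = int(pos[1]) already extracted;
-- squares are kept as List Char ('chr(nx) + str(ny)') and turned into String at the very end of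
-- the port (Python string sorting = lexicographic comparison of the code-point lists, exact here).
-- 97 = ord('a'), 104 = ord('h').
def loopA (x y : Int) : List (List Char) :=
  PySem.List.sorted
    (movesA.foldl (fun result d =>
      let nx := x + d.1
      let ny := y + d.2
      if 97 ≤ nx ∧ nx ≤ 104 ∧ 1 ≤ ny ∧ ny ≤ 8 then
        result ++ [Char.ofNat nx.toNat :: PySem.Int.toChars ny]
      else result) [])
    (fun s => s) false

def possible_positions (pos : String) : List String :=
  match PySem.Str.pyGet? pos 0 with
  | none => []                                   -- IndexError: pos[0] (excluded by Pre_)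
  | some c0 =>
    match PySem.Str.pyGet? pos 1 with
    | none => []                                 -- IndexError: pos[1] (excluded by Pre_)
    | some c1 =>
      match PySem.Int.ofChars? [c1] with
      | none => []                               -- ValueError: int(pos[1]) (excluded by Pre_)
      | some y => (loopA ((c0.toNat : Int)) y).map String.ofList

-- ===== PORT B =====
-- B's loop: range over target columns clipped to the board, skip the start column, derive the
-- rank step 3 - |dx| and test the two candidate ranks; x and y already extracted, squares as
-- List Char as in loopA.
def loopB (x y : Int) : List (List Char) :=
  (PySem.List.pyRange (max 97 (x - 2)) (min 104 (x + 2) + 1) 1).foldl (fun out nx =>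
    if nx - x = 0 then out
    else
      let step := 3 - |nx - x|
      [y - step, y + step].foldl (fun out ny =>
        if 1 ≤ ny ∧ ny ≤ 8 then out ++ [Char.ofNat nx.toNat :: PySem.Int.toChars ny]
        else out) out) []

def possible_positions_alt (pos : String) : List String :=
  match PySem.Str.pyGet? pos 0 with
  | none => []                                   -- IndexError: pos[0] (excluded by Pre_)
  | some c0 =>
    match PySem.Str.pyGet? pos 1 with
    | none => []                                 -- IndexError: pos[1] (excluded by Pre_)
    | some c1 =>
      match PySem.Int.ofChars? [c1] with
      | none => []                               -- ValueError: int(pos[1]) (excluded by Pre_)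
      | some y => (loopB ((c0.toNat : Int)) y).map String.ofList

-- ===== PRECONDITION & SPEC =====
-- Pre_ excludes exactly the inputs where A raises: pos needs at least two characters
-- (pos[0], pos[1] else IndexError) and pos[1] must be a digit (else int(pos[1]) is a ValueError).
def Pre_possible_positions (pos : String) : Prop :=
  2 ≤ pos.toList.length ∧ (pos.toList.getD 1 ' ').isDigit = true
instance (pos : String) : Decidable (Pre_possible_positions pos) := by unfold Pre_possible_positions; infer_instance

def pvWitness_possible_positions : String := "e4"

def Spec_possible_positions (pos : String) (out : List String) : Prop := out = possible_positions_alt pos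
instance (pos : String) (out : List String) : Decidable (Spec_possible_positions pos out) := by unfold Spec_possible_positions; infer_instance

-- ===== CLAIM (what is proved, stated in full; the proofs are below) =====
def Claim_equal_possible_positions : Prop := ∀ (pos : String), Dom_possible_positions pos → Pre_possible_positions pos → Spec_possible_positions pos (possible_positions pos)

-- ===== LEMMAS AND PROOFS =====

-- Outside column codes 95..106 no knight move can land on the board: A's loop appends nothing.
lemma condA_false (x : Int) (hx : x < 95 ∨ 106 < x) (dx s : Int) (h1 : -2 ≤ dx) (h2 : dx ≤ 2) :
    ¬ (97 ≤ x + dx ∧ x + dx ≤ 104 ∧ 1 ≤ s ∧ s ≤ 8) := by omega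

lemma loopA_empty (x y : Int) (hx : x < 95 ∨ 106 < x) : loopA x y = [] := by
  simp only [loopA, movesA, List.foldl]
  rw [if_neg (condA_false x hx 2 _ (by omega) (by omega)), if_neg (condA_false x hx 1 _ (by omega) (by omega)),
      if_neg (condA_false x hx (-1) _ (by omega) (by omega)), if_neg (condA_false x hx (-2) _ (by omega) (by omega)),
      if_neg (condA_false x hx (-2) _ (by omega) (by omega)), if_neg (condA_false x hx (-1) _ (by omega) (by omega)),
      if_neg (condA_false x hx 1 _ (by omega) (by omega)), if_neg (condA_false x hx 2 _ (by omega) (by omega))]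
  rfl

-- … and B's clipped column range is empty for the same reason.
lemma loopB_empty (x y : Int) (hx : x < 95 ∨ 106 < x) : loopB x y = [] := by
  rw [loopB, PySem.List.pyRange_one_eq_nil (by omega : min 104 (x + 2) + 1 ≤ max 97 (x - 2))]
  rfl

-- Inside the band 95 ≤ x ≤ 106 and digit values 0 ≤ y ≤ 9 the two loops agree, by evaluation.
set_option maxHeartbeats 4000000 in
lemma loops_agree_key : ((List.range 12).all fun a => (List.range 10).all fun b =>
    loopA ((95 : Int) + (a : Int)) ((b : Nat) : Int) == loopB ((95 : Int) + (a : Int)) ((b : Nat) : Int)) = true := by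
  decide

-- int(c) for a digit character c, by evaluation.
lemma ofChars_digit_key : ((List.range 10).all fun b =>
    PySem.Int.ofChars? [Char.ofNat (48 + b)] == some ((b : Nat) : Int)) = true := by decide

lemma loops_agree (x y : Int) (hy0 : 0 ≤ y) (hy9 : y ≤ 9) : loopA x y = loopB x y := by
  by_cases hx : 95 ≤ x ∧ x ≤ 106
  · have ha : (x - 95).toNat ∈ List.range 12 := by
      rw [List.mem_range]; omega
    have hb : y.toNat ∈ List.range 10 := by
      rw [List.mem_range]; omega
    have hk := List.all_eq_true.mp (List.all_eq_true.mp loops_agree_key _ ha) _ hb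
    have hx' : (95 : Int) + (((x - 95).toNat : Nat) : Int) = x := by omega
    have hy' : ((y.toNat : Nat) : Int) = y := by omega
    rw [hx', hy'] at hk
    exact eq_of_beq hk
  · have hx' : x < 95 ∨ 106 < x := by omega
    rw [loopA_empty x y hx', loopB_empty x y hx']

theorem possible_positions_spec_aux (pos : String) (hpre : Pre_possible_positions pos) :
    possible_positions pos = possible_positions_alt pos := by
  obtain ⟨hlen, hdig⟩ := hpre
  rcases h : pos.toList with _ | ⟨c0, rest0⟩
  · rw [h] at hlen; simp at hlen
  rcases h1 : rest0 with _ | ⟨c1, rest⟩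
  · rw [h, h1] at hlen; simp at hlen
  rw [h1] at h
  rw [h] at hdig
  simp only [List.getD, List.getElem?_cons_succ, List.getElem?_cons_zero, Option.getD_some] at hdig
  have hget0 : PySem.Str.pyGet? pos 0 = some c0 := by simp [pysem, h]
  have hget1 : PySem.Str.pyGet? pos 1 = some c1 := by simp [pysem, h]
  have hb : 48 ≤ c1.toNat ∧ c1.toNat ≤ 57 := by
    simp [Char.isDigit] at hdig; exact ⟨hdig.1, hdig.2⟩
  have hc1 : c1 = Char.ofNat (48 + (c1.toNat - 48)) := by
    rw [show 48 + (c1.toNat - 48) = c1.toNat by omega, Char.ofNat_toNat]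
  have hbmem : c1.toNat - 48 ∈ List.range 10 := by rw [List.mem_range]; omega
  have hof := eq_of_beq (List.all_eq_true.mp ofChars_digit_key _ hbmem)
  rw [← hc1] at hof
  simp only [possible_positions, possible_positions_alt, hget0, hget1, hof]
  rw [loops_agree _ _ (by omega) (by omega)]

-- ===== VERDICT (by name: the statement is the Claim_ definition above) =====
theorem possible_positions_spec : Claim_equal_possible_positions := by
  intro pos _ hpre
  exact possible_positions_spec_aux pos hpre
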